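-- pv_equiv track=rewrite | github.com/Geniolle/AppVerboBraga | appverbo/routes/profile/page_handler.py | _resolve_first_dynamic_section_key
-- ===== SOURCE A (Python) =====
-- from typing import Any
--
-- def _resolve_first_dynamic_section_key(menu_row: dict[str, Any] | None) -> str:
--     if not isinstance(menu_row, dict):
--         return "__empty__"
--     raw_rows = menu_row.get("process_visible_field_rows")
--     if not isinstance(raw_rows, list) or not raw_rows:
--         return "__empty__"
--
--     section_order: list[str] = []
--     seen_sections: set[str] = set()
--     first_field_key = ""
--     for raw_row in raw_rows:
--         if not isinstance(raw_row, dict):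
--             continue
--         field_key = str(raw_row.get("field_key") or "").strip().lower()
--         if not field_key:
--             continue
--         if not first_field_key:
--             first_field_key = field_key
--         header_key = str(raw_row.get("header_key") or "").strip().lower()
--         section_key = header_key or "__geral__"
--         if section_key in seen_sections:
--             continue
--         seen_sections.add(section_key)
--         section_order.append(section_key)
--
--     if not section_order:
--         return "__empty__"
--     if len(section_order) == 1 and section_order[0] == "__geral__":
--         return f"field:{first_field_key}" if first_field_key else "__empty__"
--     return section_order[0]
-- ===== SOURCE B (Python) =====
-- def _resolve_first_dynamic_section_key(menu_row):
--     if not isinstance(menu_row, dict):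
--         return "__empty__"
--     raw_rows = menu_row.get("process_visible_field_rows")
--     if not isinstance(raw_rows, list) or not raw_rows:
--         return "__empty__"
--     pairs = [
--         (str(r.get("field_key") or "").strip().lower(),
--          str(r.get("header_key") or "").strip().lower() or "__geral__")
--         for r in raw_rows
--         if isinstance(r, dict)
--     ]
--     keys = [(f, s) for f, s in pairs if f]
--     if not keys:
--         return "__empty__"
--     if all(s == "__geral__" for _, s in keys):
--         return f"field:{keys[0][0]}"
--     return keys[0][1]
-- ===== Notes on version B (the rewrite author's own statement) =====
-- stated objective: simpler
-- what changed: Replaces A's stateful loop with an ordered section list plus a seen-set by two staged comprehensions that build the list of (field_key, section_key) pairs of valid rows, then a single all() test and indexing keys[0]; no mutable per-iteration bookkeeping.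
import Mathlib
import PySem

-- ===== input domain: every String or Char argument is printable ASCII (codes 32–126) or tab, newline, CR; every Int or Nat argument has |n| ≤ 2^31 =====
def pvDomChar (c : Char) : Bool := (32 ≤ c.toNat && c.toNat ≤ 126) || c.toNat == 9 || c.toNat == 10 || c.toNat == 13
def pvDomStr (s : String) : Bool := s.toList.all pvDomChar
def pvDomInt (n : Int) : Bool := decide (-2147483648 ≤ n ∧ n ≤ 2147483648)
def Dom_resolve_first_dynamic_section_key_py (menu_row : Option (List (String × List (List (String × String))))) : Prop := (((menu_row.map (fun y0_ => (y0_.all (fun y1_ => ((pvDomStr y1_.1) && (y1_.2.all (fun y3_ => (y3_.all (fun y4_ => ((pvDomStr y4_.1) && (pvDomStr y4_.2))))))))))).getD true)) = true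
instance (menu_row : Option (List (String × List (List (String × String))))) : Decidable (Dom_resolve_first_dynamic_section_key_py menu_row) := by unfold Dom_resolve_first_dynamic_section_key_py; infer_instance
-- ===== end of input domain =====

-- B drops A's stateful loop (ordered section list + seen set + running first key) for two
-- staged comprehensions building the (field_key, section_key) pairs of valid rows, then an
-- all() test and keys[0]: simpler, no mutable bookkeeping.

-- shared helper: str(row.get(k) or "").strip().lower()
def pvKey (raw_row : List (String × String)) (k : String) : String :=
  PySem.Str.lower (PySem.Str.strip (PySem.Dict.getD (PySem.Dict.mk raw_row) k ""))

-- ===== PORT A =====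
-- one iteration of A's loop body over state (section_order, seen_sections, first_field_key)
def pvStepA (st : List String × PySem.Set String × String)
    (raw_row : List (String × String)) : List String × PySem.Set String × String :=
  let (section_order, seen_sections, first_field_key) := st
  let field_key := pvKey raw_row "field_key"
  if field_key = "" then st
  else
    let first_field_key := if first_field_key = "" then field_key else first_field_key
    let header_key := pvKey raw_row "header_key"
    let section_key := if header_key = "" then "__geral__" else header_key
    if seen_sections.contains section_key then (section_order, seen_sections, first_field_key)
    else (section_order ++ [section_key], seen_sections.add section_key, first_field_key)

def resolve_first_dynamic_section_key_py
    (menu_row : Option (List (String × List (List (String × String))))) : String :=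
  match menu_row with
  | none => "__empty__"
  | some d =>
    match PySem.Dict.get? (PySem.Dict.mk d) "process_visible_field_rows" with
    | none => "__empty__"
    | some raw_rows =>
      if raw_rows = [] then "__empty__"
      else
        let st := raw_rows.foldl pvStepA ([], PySem.Set.ofList [], "")
        let section_order := st.1
        let first_field_key := st.2.2
        if section_order = [] then "__empty__"
        else if section_order.length = 1 ∧ section_order.headD "" = "__geral__" then
          if first_field_key = "" then "__empty__" else "field:" ++ first_field_key
        else section_order.headD ""

-- ===== PORT B =====
-- the (field_key, section_key) pair of one row, as Source B's first comprehension builds it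
def pvRowKeys (raw_row : List (String × String)) : String × String :=
  let h := pvKey raw_row "header_key"
  (pvKey raw_row "field_key", if h = "" then "__geral__" else h)

def resolve_first_dynamic_section_key_py_alt
    (menu_row : Option (List (String × List (List (String × String))))) : String :=
  match menu_row with
  | none => "__empty__"
  | some d =>
    match PySem.Dict.get? (PySem.Dict.mk d) "process_visible_field_rows" with
    | none => "__empty__"
    | some raw_rows =>
      if raw_rows = [] then "__empty__"
      else
        let pairs := raw_rows.map pvRowKeys
        let keys := pairs.filter (fun p => p.1 != "")
        if keys = [] then "__empty__"
        else if keys.all (fun p => p.2 == "__geral__") then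
          "field:" ++ (keys.headD ("", "")).1
        else (keys.headD ("", "")).2

-- ===== PRECONDITION & SPEC =====
def Spec_resolve_first_dynamic_section_key_py (menu_row : Option (List (String × List (List (String × String))))) (out : String) : Prop := out = resolve_first_dynamic_section_key_py_alt menu_row
instance (menu_row : Option (List (String × List (List (String × String))))) (out : String) : Decidable (Spec_resolve_first_dynamic_section_key_py menu_row out) := by unfold Spec_resolve_first_dynamic_section_key_py; infer_instance

-- ===== CLAIM (what is proved, stated in full; the proofs are below) =====
def Claim_equal_resolve_first_dynamic_section_key_py : Prop := ∀ (menu_row : Option (List (String × List (List (String × String))))), Dom_resolve_first_dynamic_section_key_py menu_row → Spec_resolve_first_dynamic_section_key_py menu_row (resolve_first_dynamic_section_key_py menu_row)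

-- ===== LEMMAS AND PROOFS =====

-- invariant: A's loop state over a processed prefix whose filtered key list is ks
def pvInvA (ks : List (String × String)) (st : List String × PySem.Set String × String) : Prop :=
  (∀ s, s ∈ st.2.1 ↔ s ∈ st.1) ∧
  st.1.Nodup ∧
  (∀ s, s ∈ st.1 ↔ s ∈ ks.map Prod.snd) ∧
  st.2.2 = (ks.headD ("", "")).1 ∧
  st.1.headD "" = (ks.headD ("", "")).2 ∧
  (∀ p ∈ ks, p.1 ≠ "")

theorem pvInvA_step (ks : List (String × String)) (st : List String × PySem.Set String × String)
    (r : List (String × String)) (h : pvInvA ks st) :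
    pvInvA (ks ++ (if (pvRowKeys r).1 = "" then [] else [pvRowKeys r])) (pvStepA st r) := by
  obtain ⟨order, seen, first⟩ := st
  obtain ⟨hmem, hnd, hord, hfirst, hhead, hfk⟩ := h
  simp only at hmem hnd hord hfirst hhead
  unfold pvStepA pvRowKeys
  by_cases hf : pvKey r "field_key" = ""
  · simp only [hf, if_pos, List.append_nil]
    exact ⟨hmem, hnd, hord, hfirst, hhead, hfk⟩
  · simp only [if_neg hf]
    set sk := (if pvKey r "header_key" = "" then "__geral__" else pvKey r "header_key") with hsk
    by_cases hks : ks = []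
    · subst hks
      have horder : order = [] := by
        rw [List.eq_nil_iff_forall_not_mem]
        intro s hs
        have := (hord s).mp hs
        simp at this
      subst horder
      have hcont : seen.contains sk = false := by
        rw [Bool.eq_false_iff]
        intro hc
        have : sk ∈ seen := by simpa [List.contains_eq_mem] using hc
        have := (hmem sk).mp this
        simp at this
      have hfirst0 : first = "" := by simpa using hfirst
      simp only [hcont, Bool.false_eq_true, reduceIte, hfirst0, List.nil_append]
      refine ⟨?_, by simp, ?_, by simp, by simp, ?_⟩
      · intro s
        rw [PySem.Set.mem_add]
        have := hmem s
        simp only [List.not_mem_nil, iff_false] at this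
        simp [this]
      · intro s; simp
      · intro p hp
        simp only [List.mem_singleton] at hp
        rw [hp]
        exact hf
    · have hksne : ∃ q, q ∈ ks := by
        rcases ks with _ | ⟨q, t⟩
        · exact absurd rfl hks
        · exact ⟨q, by simp⟩
      obtain ⟨q, hq⟩ := hksne
      have hone : order ≠ [] := by
        intro h0
        have := (hord q.2).mpr (List.mem_map_of_mem hq)
        rw [h0] at this
        exact List.not_mem_nil this
      have hfirstne : first ≠ "" := by
        rw [hfirst]
        rcases ks with _ | ⟨p, t⟩
        · exact absurd rfl hks
        · exact hfk p (by simp)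
      have hheadapp : ∀ x : String × String, (ks ++ [x]).headD ("", "") = ks.headD ("", "") := by
        intro x
        rcases ks with _ | ⟨p, t⟩
        · exact absurd rfl hks
        · simp
      simp only [if_neg hfirstne]
      by_cases hc : seen.contains sk = true
      · have hskin : sk ∈ order := (hmem sk).mp (by simpa [List.contains_eq_mem] using hc)
        simp only [hc, if_true]
        refine ⟨hmem, hnd, ?_, by rw [hfirst, hheadapp], by rw [hhead, hheadapp], ?_⟩
        · intro s
          simp only [List.map_append, List.map_cons, List.map_nil, List.mem_append,
            List.mem_singleton, hord s]
          constructor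
          · intro h1; exact Or.inl h1
          · rintro (h1 | h1)
            · exact h1
            · rw [h1]; exact (hord sk).mp hskin
        · intro p hp
          rcases List.mem_append.mp hp with h1 | h1
          · exact hfk p h1
          · simp only [List.mem_singleton] at h1; rw [h1]; exact hf
      · have hskout : sk ∉ order := fun h1 => hc (by
          simpa [PySem.Set.contains] using (hmem sk).mpr h1)
        simp only [hc, Bool.false_eq_true, reduceIte]
        refine ⟨?_, ?_, ?_, by rw [hfirst, hheadapp], ?_, ?_⟩
        · intro s
          rw [PySem.Set.mem_add]
          simp [hmem s]
        · rw [List.nodup_append]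
          refine ⟨hnd, by simp, ?_⟩
          intro a ha b hb
          simp only [List.mem_singleton] at hb
          intro hab
          exact hskout ((hab.trans hb) ▸ ha)
        · intro s
          simp only [List.map_append, List.map_cons, List.map_nil, List.mem_append,
            List.mem_singleton, hord s]
        · rw [hheadapp]
          rcases order with _ | ⟨x, t⟩
          · exact absurd rfl hone
          · simpa using hhead
        · intro p hp
          rcases List.mem_append.mp hp with h1 | h1
          · exact hfk p h1
          · simp only [List.mem_singleton] at h1; rw [h1]; exact hf

theorem pvInvA_foldl (rows : List (List (String × String)))
    (ks : List (String × String)) (st : List String × PySem.Set String × String)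
    (h : pvInvA ks st) :
    pvInvA (ks ++ (rows.map pvRowKeys).filter (fun p => p.1 != ""))
      (rows.foldl pvStepA st) := by
  induction rows generalizing ks st with
  | nil => simpa using h
  | cons r rs ih =>
    rw [List.foldl_cons, List.map_cons, List.filter_cons]
    have hstep := pvInvA_step ks st r h
    by_cases hf : (pvRowKeys r).1 = ""
    · have : ((pvRowKeys r).1 != "") = false := by simp [hf]
      rw [this]
      simp only [Bool.false_eq_true, reduceIte]
      rw [if_pos hf, List.append_nil] at hstep
      exact ih ks (pvStepA st r) hstep
    · have : ((pvRowKeys r).1 != "") = true := by simp [hf]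
      rw [this]
      simp only [if_true]
      rw [if_neg hf] at hstep
      have := ih (ks ++ [pvRowKeys r]) (pvStepA st r) hstep
      simpa using this

-- ===== VERDICT (by name: the statement is the Claim_ definition above) =====
theorem resolve_first_dynamic_section_key_py_spec : Claim_equal_resolve_first_dynamic_section_key_py := by
  intro menu_row hdom
  unfold Spec_resolve_first_dynamic_section_key_py
  clear hdom
  cases menu_row with
  | none => rfl
  | some d =>
    simp only [resolve_first_dynamic_section_key_py, resolve_first_dynamic_section_key_py_alt]
    cases hg : PySem.Dict.get? (PySem.Dict.mk d) "process_visible_field_rows" with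
    | none => rfl
    | some raw_rows =>
      by_cases he : raw_rows = []
      · simp [he]
      · simp only [if_neg he]
        have hbase : pvInvA [] ([], PySem.Set.ofList [], "") := by
          refine ⟨fun s => by simp, by simp, fun s => by simp, by simp, by simp, by simp⟩
        have hinv := pvInvA_foldl raw_rows [] _ hbase
        rw [List.nil_append] at hinv
        set ks := (raw_rows.map pvRowKeys).filter (fun p => p.1 != "") with hksdef
        generalize hA : raw_rows.foldl pvStepA ([], PySem.Set.ofList [], "") = sA at hinv ⊢
        obtain ⟨order, seen, first⟩ := sA
        obtain ⟨hmem, hnd, hord, hfirst, hhead, hfk⟩ := hinv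
        simp only at hmem hnd hord hfirst hhead ⊢
        by_cases hks : ks = []
        · have horder : order = [] := by
            rw [List.eq_nil_iff_forall_not_mem]
            intro s hs
            have := (hord s).mp hs
            rw [hks] at this
            simp at this
          simp [horder, hks]
        · have hone : order ≠ [] := by
            intro h0
            rcases ks with _ | ⟨q, t⟩
            · exact absurd rfl hks
            · have := (hord q.2).mpr (by simp)
              rw [h0] at this
              simp at this
          have hfirstne : first ≠ "" := by
            rw [hfirst]
            rcases ks with _ | ⟨p, t⟩
            · exact absurd rfl hks
            · exact hfk p (by simp)
          simp only [if_neg hone, if_neg hks]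
          by_cases hall : ks.all (fun p => p.2 == "__geral__") = true
          · -- every section key is "__geral__": order must be exactly ["__geral__"]
            have horder : order = ["__geral__"] := by
              have hsub : ∀ s ∈ order, s = "__geral__" := by
                intro s hs
                have := (hord s).mp hs
                rcases List.mem_map.mp this with ⟨p, hp, hps⟩
                have := List.all_eq_true.mp hall p hp
                simp only [beq_iff_eq] at this
                rw [← hps, this]
              rcases order with _ | ⟨x, t⟩
              · exact absurd rfl hone
              · have hx := hsub x (by simp)
                cases t with
                | nil => simp [hx]
                | cons y t' =>
                  exfalso
                  have hy := hsub y (by simp)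
                  have := (List.nodup_cons.mp hnd).1
                  rw [hx, ← hy] at this
                  exact this (by simp)
            have hcond : order.length = 1 ∧ order.headD "" = "__geral__" := by
              rw [horder]; exact ⟨rfl, rfl⟩
            rw [if_pos hcond, if_neg hfirstne, if_pos hall, hfirst]
          · have hcond : ¬(order.length = 1 ∧ order.headD "" = "__geral__") := by
              rintro ⟨h1, h2⟩
              rcases order with _ | ⟨x, _ | ⟨y, t⟩⟩
              · exact hone rfl
              · simp only [List.headD_cons] at h2
                apply hall
                rw [List.all_eq_true]
                intro p hp
                have := (hord p.2).mpr (List.mem_map_of_mem hp)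
                simp only [List.mem_singleton] at this
                simp [this, h2]
              · simp at h1
            rw [if_neg hcond, if_neg hall, hhead]
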